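-- pv_equiv track=rewrite | github.com/felipemiziara/IPT_Masters | code/EP2/Piramide.py | clibingPyramid
-- ===== SOURCE A (Python) =====
-- def clibingPyramid(n, brokenRocks):
--
--     tabulation = [[0 for _ in range(n)] for _ in range(n)]
--     """
--         Setar a base da piramide com todas as possibilidades de início:
--             1 - Para as pedras que podem iniciar a subida setar 1;
--             2 - Deixe o valor 0 para as pedras estragadas.
--     """
--     for i in range(n):
--         if brokenRocks.get(1) != i + 1:
--             tabulation[0][i] = 1
--
--     """
--         Agora, é subir a pirâmide de acordo com as regras:
--             * - Subir na pedra imediatamente a cima;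
--             * - Subir na pedra a cima e seguinte;
--             * - Subir somente em pedras não defeituosas.
--
--         O For começa em 1 pois a primeira linha, como a estragégia
--         dinâmica foi a tabulation, estamos indo bottom-up, desta
--         forma a inicialização da primeira linha foi necessária.
--     """
--     for i in range(1, n):
--         """
--             n - 1: Aqui para ganhar eficiência, só processamos de fato as pedras
--             que fazem parte da pirâmide, porém usamos a estrutura de matriz.
--         """
--         for j in range(n - i):
--             if brokenRocks.get(i+1) != j + 1 :
--                 tabulation[i][j] = tabulation[i - 1][j] + tabulation[i - 1][j + 1]
--     # De acordo com a estratégia bottom-up, a soma de todas as possibilidades fica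
--     #   no topo da pirâmede, que é a posição P (N-1, 0)
--     return tabulation[n-1][0]
-- ===== SOURCE B (Python) =====
-- def clibingPyramid(n, brokenRocks):
--     # Combinatorial count: 2^(n-1) total paths, minus paths that hit a broken
--     # rock, decomposed by the FIRST broken rock reached (binomial segment counts).
--     def comb(m, r):
--         if r < 0 or r > m:
--             return 0
--         res = 1
--         for t in range(r):
--             res = res * (m - t) // (t + 1)
--         return res
--     cells = sorted(((l, p) for l, p in brokenRocks.items()
--                     if 1 <= l <= n and 1 <= p <= n - l + 1),
--                    key=lambda c: c[0])
--     first = []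
--     for l, p in cells:
--         first.append(2 ** (l - 1)
--                      - sum(f0 * comb(l - l0, p0 - p)
--                            for (l0, p0), f0 in zip(cells, first)))
--     return 2 ** (n - 1) - sum(f * comb(n - l, p - 1)
--                               for (l, p), f in zip(cells, first))
-- ===== Notes on version B (the rewrite author's own statement) =====
-- stated objective: faster
-- what changed: B abandons A's O(n^2) dynamic-programming table entirely: it counts paths combinatorially as 2^(n-1) minus, for each broken rock taken as the first one a path hits, (paths from base to that rock avoiding earlier broken rocks) times (binomial count of paths from the rock to the top), so cost scales with the number of broken rocks instead of n^2 cells.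
import Mathlib
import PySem

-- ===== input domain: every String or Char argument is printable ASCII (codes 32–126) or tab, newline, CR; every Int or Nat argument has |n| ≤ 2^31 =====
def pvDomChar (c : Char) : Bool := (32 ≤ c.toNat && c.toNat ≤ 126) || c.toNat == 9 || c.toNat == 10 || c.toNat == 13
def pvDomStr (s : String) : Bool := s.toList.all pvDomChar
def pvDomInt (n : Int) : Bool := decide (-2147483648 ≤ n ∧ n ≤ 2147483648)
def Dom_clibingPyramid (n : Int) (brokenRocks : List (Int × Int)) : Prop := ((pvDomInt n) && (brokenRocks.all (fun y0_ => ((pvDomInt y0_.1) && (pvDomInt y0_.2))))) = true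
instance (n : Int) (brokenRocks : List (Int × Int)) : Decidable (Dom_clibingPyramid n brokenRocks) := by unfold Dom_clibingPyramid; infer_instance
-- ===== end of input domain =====

-- B replaces A's O(n^2) DP table by a combinatorial count: 2^(n-1) total paths minus, decomposed by the first broken rock a path hits, products of binomial segment counts over the (at most one per level) broken rocks.


-- ===== PORT A =====
-- brokenRocks.get(k): dict lookup, shared by both ports
def getBR (br : List (Int × Int)) (k : Int) : Option Int := (PySem.Dict.mk br).get? k

def clibingPyramid (n : Int) (brokenRocks : List (Int × Int)) : Int :=
  -- tabulation = [[0]*n]*n (fresh rows)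
  let tab0 : List (List Int) :=
    (PySem.List.pyRange 0 n 1).map (fun _ => (PySem.List.pyRange 0 n 1).map (fun _ => (0 : Int)))
  -- for i in range(n): if brokenRocks.get(1) != i+1: tabulation[0][i] = 1
  let tab1 := (PySem.List.pyRange 0 n 1).foldl (fun t i =>
      if getBR brokenRocks 1 ≠ some (i + 1) then
        PySem.List.pySetD t 0 (PySem.List.pySetD (PySem.List.pyGetD t 0 []) i 1)
      else t) tab0
  -- for i in range(1, n): for j in range(n-i): …
  let tab2 := (PySem.List.pyRange 1 n 1).foldl (fun t i =>
      (PySem.List.pyRange 0 (n - i) 1).foldl (fun t j =>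
        if getBR brokenRocks (i + 1) ≠ some (j + 1) then
          PySem.List.pySetD t i (PySem.List.pySetD (PySem.List.pyGetD t i []) j
            (PySem.List.pyGetD (PySem.List.pyGetD t (i - 1) []) j 0
             + PySem.List.pyGetD (PySem.List.pyGetD t (i - 1) []) (j + 1) 0))
        else t) t) tab1
  -- return tabulation[n-1][0]  (raises for n ≤ 0: excluded by Pre_)
  PySem.List.pyGetD (PySem.List.pyGetD tab2 (n - 1) []) 0 0

-- ===== PORT B =====
-- comb(m, r): the multiplicative binomial-coefficient loop of Source B
def comb (m r : Int) : Int :=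
  if r < 0 ∨ m < r then 0
  else (PySem.List.pyRange 0 r 1).foldl
    (fun res t => PySem.Int.floordiv (res * (m - t)) (t + 1)) 1

-- sum(f0 * comb(l - l0, p0 - p) for (l0, p0), f0 in zip(cells, first))
def combSum (P : List ((Int × Int) × Int)) (l p : Int) : Int :=
  (P.map (fun cf => cf.2 * comb (l - cf.1.1) (cf.1.2 - p))).sum

-- cells = sorted(((l, p) for l, p in brokenRocks.items() if …), key=lambda c: c[0])
def cellsOf (n : Int) (br : List (Int × Int)) : List (Int × Int) :=
  PySem.List.sorted
    (((PySem.Dict.mk br).items).filter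
      (fun lp => decide (1 ≤ lp.1 ∧ lp.1 ≤ n ∧ 1 ≤ lp.2 ∧ lp.2 ≤ n - lp.1 + 1)))
    (fun c => c.1) false

-- one iteration of Source B's 'for l, p in cells: first.append(…)' loop
def stepF (cells : List (Int × Int)) (first : List Int) (c : Int × Int) : List Int :=
  first ++ [2 ^ (c.1 - 1).toNat - combSum (cells.zip first) c.1 c.2]

def clibingPyramid_alt (n : Int) (brokenRocks : List (Int × Int)) : Int :=
  let cells := cellsOf n brokenRocks
  let first := cells.foldl (stepF cells) []
  -- return 2 ** (n - 1) - sum(f * comb(n - l, p - 1) …)  (n ≤ 0 is outside Pre_)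
  2 ^ (n - 1).toNat - combSum (cells.zip first) n 1

-- ===== PRECONDITION & SPEC =====
-- Pre_ excludes n ≤ 0, where both Pythons raise (IndexError resp. a float 2**(n-1)),
-- and association lists with duplicate keys, which do not encode a Python dict
-- (brokenRocks is a dict in Python, so its item list always has distinct keys).
def Pre_clibingPyramid (n : Int) (brokenRocks : List (Int × Int)) : Prop :=
  1 ≤ n ∧ (brokenRocks.map Prod.fst).Nodup
instance (n : Int) (brokenRocks : List (Int × Int)) : Decidable (Pre_clibingPyramid n brokenRocks) := by unfold Pre_clibingPyramid; infer_instance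
def pvWitness_clibingPyramid : Int × (List (Int × Int)) := (3, [(2, 1)])

def Spec_clibingPyramid (n : Int) (brokenRocks : List (Int × Int)) (out : Int) : Prop := out = clibingPyramid_alt n brokenRocks
instance (n : Int) (brokenRocks : List (Int × Int)) (out : Int) : Decidable (Spec_clibingPyramid n brokenRocks out) := by unfold Spec_clibingPyramid; infer_instance

-- ===== CLAIM (what is proved, stated in full; the proofs are below) =====
def Claim_equal_clibingPyramid : Prop := ∀ (n : Int) (brokenRocks : List (Int × Int)), Dom_clibingPyramid n brokenRocks → Pre_clibingPyramid n brokenRocks → Spec_clibingPyramid n brokenRocks (clibingPyramid n brokenRocks)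

-- ===== LEMMAS AND PROOFS =====

-- The mathematical pyramid rows: trueRow k is the (k+1)-st level (length n.toNat - k).
def nextRow (b : Option Int) (r : List Int) : List Int :=
  (PySem.List.pyRange 0 ((r.length : Int) - 1) 1).map (fun j =>
    if b = some (j + 1) then (0 : Int)
    else PySem.List.pyGetD r j 0 + PySem.List.pyGetD r (j + 1) 0)

def trueRow (br : List (Int × Int)) (n : Int) : Nat → List Int
  | 0 => (PySem.List.pyRange 0 n 1).map (fun j => if getBR br 1 = some (j + 1) then (0 : Int) else 1)
  | k + 1 => nextRow (getBR br ((k : Int) + 2)) (trueRow br n k)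

-- Row q of A's matrix, padded with the untouched zeros to full width.
def padRow (br : List (Int × Int)) (n : Int) (q : Nat) : List Int :=
  trueRow br n q ++ List.replicate q 0

-- A's matrix after the rows up to index k have been filled.
def matA (br : List (Int × Int)) (n : Int) (k : Nat) : List (List Int) :=
  (List.range n.toNat).map (fun q => if q ≤ k then padRow br n q else List.replicate n.toNat 0)

lemma length_nextRow (b : Option Int) (r : List Int) :
    (nextRow b r).length = ((r.length : Int) - 1).toNat := by
  simp [nextRow, PySem.List.length_pyRange_one]

lemma length_trueRow (br : List (Int × Int)) (n : Int) (k : Nat) (h : k ≤ n.toNat) :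
    (trueRow br n k).length = n.toNat - k := by
  induction k with
  | zero => simp [trueRow, PySem.List.length_pyRange_one]
  | succ k ih =>
      rw [trueRow, length_nextRow, ih (by omega)]
      omega

lemma eq_of_getD (xs ys : List Int) (hlen : xs.length = ys.length)
    (h : ∀ q, q < xs.length → xs.getD q 0 = ys.getD q 0) : xs = ys := by
  apply List.ext_getElem hlen
  intro q h1 h2
  have := h q h1
  rwa [List.getD_eq_getElem _ _ h1, List.getD_eq_getElem _ _ h2] at this

lemma eq_of_getD' (xs ys : List (List Int)) (hlen : xs.length = ys.length)
    (h : ∀ q, q < xs.length → xs.getD q [] = ys.getD q []) : xs = ys := by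
  apply List.ext_getElem hlen
  intro q h1 h2
  have := h q h1
  rwa [List.getD_eq_getElem _ _ h1, List.getD_eq_getElem _ _ h2] at this

lemma pyGetD_append_left_zero (a b : List Int) (j : Int) (h0 : 0 ≤ j)
    (h1 : j < (a.length : Int)) :
    PySem.List.pyGetD (a ++ b) j 0 = PySem.List.pyGetD a j 0 := by
  rw [PySem.List.pyGetD_eq_getElem _ _ h0 (by simp; omega),
    PySem.List.pyGetD_eq_getElem _ _ h0 h1, List.getElem_append_left (by omega)]

lemma getD_replicate_zero (m q : Nat) : (List.replicate m (0 : Int)).getD q 0 = 0 := by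
  by_cases h : q < m
  · rw [List.getD_eq_getElem _ _ (by simpa using h)]
    simp
  · rw [List.getD_eq_default _ _ (by simpa using h)]

lemma getD_trueRow_zero (br : List (Int × Int)) (n : Int) (q : Nat) (h : (q : Int) < n) :
    (trueRow br n 0).getD q 0 = if getBR br 1 = some ((q : Int) + 1) then 0 else 1 := by
  rw [trueRow, List.getD_eq_getElem _ _
    (by simp only [List.length_map, PySem.List.length_pyRange_one]; omega)]
  rw [List.getElem_map, PySem.List.getElem_pyRange_one]
  simp

lemma getD_nextRow (b : Option Int) (r : List Int) (q : Nat)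
    (h : (q : Int) < (r.length : Int) - 1) :
    (nextRow b r).getD q 0 = if b = some ((q : Int) + 1) then 0
      else PySem.List.pyGetD r q 0 + PySem.List.pyGetD r ((q : Int) + 1) 0 := by
  rw [nextRow, List.getD_eq_getElem _ _
    (by simp only [List.length_map, PySem.List.length_pyRange_one]; omega)]
  rw [List.getElem_map, PySem.List.getElem_pyRange_one]
  simp

lemma getD_padRow_lo (br : List (Int × Int)) (n : Int) (q qq : Nat)
    (h : qq < (trueRow br n q).length) :
    (padRow br n q).getD qq 0 = (trueRow br n q).getD qq 0 := by
  simp only [padRow]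
  rw [List.getD_eq_getElem _ _ (by simp only [List.length_append]; omega),
    List.getElem_append_left h, List.getD_eq_getElem _ _ h]

lemma getD_padRow_hi (br : List (Int × Int)) (n : Int) (q qq : Nat)
    (h : (trueRow br n q).length ≤ qq) :
    (padRow br n q).getD qq 0 = 0 := by
  simp only [padRow]
  by_cases hlt : qq < (trueRow br n q ++ List.replicate q 0).length
  · rw [List.getD_eq_getElem _ _ hlt, List.getElem_append_right h]
    simp
  · rw [List.getD_eq_default _ _ (by omega)]

lemma getD_matA (br : List (Int × Int)) (n : Int) (k q : Nat) (h : q < n.toNat) :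
    (matA br n k).getD q [] = if q ≤ k then padRow br n q else List.replicate n.toNat 0 := by
  rw [matA, List.getD_eq_getElem _ _ (by simp only [List.length_map, List.length_range]; omega)]
  rw [List.getElem_map, List.getElem_range]

lemma length_matA (br : List (Int × Int)) (n : Int) (k : Nat) :
    (matA br n k).length = n.toNat := by
  simp [matA]

-- A's row-0 loop only touches row 0.
lemma foldl_set_zero (c : Int → Prop) [DecidablePred c] (g : Int → List Int → List Int)
    (l : List Int) :
    ∀ (h : List Int) (tl : List (List Int)),
    l.foldl (fun t i => if c i then
        PySem.List.pySetD t 0 (g i (PySem.List.pyGetD t 0 [])) else t) (h :: tl)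
    = (l.foldl (fun r i => if c i then g i r else r) h) :: tl := by
  induction l with
  | nil => intro h tl; rfl
  | cons a l ih =>
      intro h tl
      simp only [List.foldl_cons]
      split_ifs with hc
      · rw [PySem.List.pyGetD_zero_cons]
        have hset : PySem.List.pySetD (h :: tl) 0 (g a h) = (g a h) :: tl := by
          rw [PySem.List.pySetD_of_nonneg _ _ (by norm_num)]; rfl
        rw [hset, ih]
      · rw [ih]

lemma length_foldl_pySetD (c : Int → Prop) [DecidablePred c] (w : Int → Int) (l : List Int)
    (r0 : List Int) :
    (l.foldl (fun r j => if c j then PySem.List.pySetD r j (w j) else r) r0).length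
      = r0.length := by
  induction l generalizing r0 with
  | nil => rfl
  | cons a l ih =>
      simp only [List.foldl_cons]
      split_ifs
      · rw [ih, PySem.List.length_pySetD]
      · exact ih r0

-- generic: a fold writing positions of l (nodup, nonneg) into a row, elementwise.
lemma getD_foldl_pySetD (c : Int → Prop) [DecidablePred c] (w : Int → Int) (l : List Int)
    (hnd : l.Nodup) (hpos : ∀ j ∈ l, 0 ≤ j) (r0 : List Int) (q : Nat) (hq : q < r0.length) :
    (l.foldl (fun r j => if c j then PySem.List.pySetD r j (w j) else r) r0).getD q 0
      = if (q : Int) ∈ l ∧ c q then w q else r0.getD q 0 := by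
  induction l using List.reverseRecOn with
  | nil => simp
  | append_singleton l a ih =>
      simp only [List.nodup_append, List.mem_singleton] at hnd
      have hnd' : l.Nodup := hnd.1
      have hpos' : ∀ j ∈ l, 0 ≤ j := fun j hj => hpos j (List.mem_append_left _ hj)
      have ha : 0 ≤ a := hpos a (List.mem_append_right _ (List.mem_singleton_self a))
      have hlen : (l.foldl (fun r j => if c j then PySem.List.pySetD r j (w j) else r) r0).length = r0.length :=
        length_foldl_pySetD c w l r0
      simp only [List.foldl_append, List.foldl_cons, List.foldl_nil]
      by_cases hca : c a
      · rw [if_pos hca, PySem.List.pySetD_of_nonneg _ _ ha]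
        by_cases hqa : (q : Int) = a
        · subst hqa
          simp only [Int.toNat_natCast]
          rw [List.getD_eq_getElem _ _ (by simp only [List.length_set]; omega),
            List.getElem_set_self]
          rw [if_pos ⟨List.mem_append_right _ (List.mem_singleton_self _), hca⟩]
        · have hne : a.toNat ≠ q := by omega
          rw [List.getD_eq_getElem?_getD, List.getElem?_set_ne hne, ← List.getD_eq_getElem?_getD,
            ih hnd' hpos']
          by_cases hql : (q : Int) ∈ l ∧ c q
          · rw [if_pos hql, if_pos ⟨List.mem_append_left _ hql.1, hql.2⟩]
          · rw [if_neg hql, if_neg (by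
              rintro ⟨hm, hcq⟩
              rcases List.mem_append.mp hm with hmem | hmem
              · exact hql ⟨hmem, hcq⟩
              · exact hqa (List.mem_singleton.mp hmem))]
      · rw [if_neg hca, ih hnd' hpos']
        by_cases hql : (q : Int) ∈ l ∧ c q
        · rw [if_pos hql, if_pos ⟨List.mem_append_left _ hql.1, hql.2⟩]
        · rw [if_neg hql, if_neg (by
            rintro ⟨hm, hcq⟩
            rcases List.mem_append.mp hm with hmem | hmem
            · exact hql ⟨hmem, hcq⟩
            · rw [List.mem_singleton.mp hmem] at hcq; exact hca hcq)]

-- A's inner j-loop is a set of row i, reading the fixed row i-1.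
lemma inner_to_set (br : List (Int × Int)) (i : Int) (h1 : 1 ≤ i) (l : List Int) :
    ∀ t : List (List Int), i < (t.length : Int) →
    l.foldl (fun t j => if getBR br (i + 1) ≠ some (j + 1) then
        PySem.List.pySetD t i (PySem.List.pySetD (PySem.List.pyGetD t i []) j
          (PySem.List.pyGetD (PySem.List.pyGetD t (i - 1) []) j 0
           + PySem.List.pyGetD (PySem.List.pyGetD t (i - 1) []) (j + 1) 0))
      else t) t
    = t.set i.toNat (l.foldl (fun r j => if getBR br (i + 1) ≠ some (j + 1) then
        PySem.List.pySetD r j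
          (PySem.List.pyGetD (PySem.List.pyGetD t (i - 1) []) j 0
           + PySem.List.pyGetD (PySem.List.pyGetD t (i - 1) []) (j + 1) 0)
      else r) (PySem.List.pyGetD t i [])) := by
  induction l with
  | nil =>
      intro t ht
      simp only [List.foldl_nil]
      rw [PySem.List.pyGetD_eq_getElem _ _ (by omega) (by omega), List.set_getElem_self]
  | cons a l ih =>
      intro t ht
      simp only [List.foldl_cons]
      by_cases hc : getBR br (i + 1) ≠ some (a + 1)
      · rw [if_pos hc, if_pos hc]
        set x := PySem.List.pySetD (PySem.List.pyGetD t i []) a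
          (PySem.List.pyGetD (PySem.List.pyGetD t (i - 1) []) a 0
           + PySem.List.pyGetD (PySem.List.pyGetD t (i - 1) []) (a + 1) 0) with hx
        have hset : PySem.List.pySetD t i x = t.set i.toNat x :=
          PySem.List.pySetD_of_nonneg _ _ (by omega)
        have hlen : i < ((t.set i.toNat x).length : Int) := by
          rw [List.length_set]; exact ht
        rw [hset, ih (t.set i.toNat x) hlen]
        have hprev : PySem.List.pyGetD (t.set i.toNat x) (i - 1) [] = PySem.List.pyGetD t (i - 1) [] := by
          rw [PySem.List.pyGetD_eq_getElem _ _ (by omega) (by rw [List.length_set]; omega),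
            PySem.List.pyGetD_eq_getElem _ _ (by omega) (by omega),
            List.getElem_set_ne (by omega)]
        have hcur : PySem.List.pyGetD (t.set i.toNat x) i [] = x := by
          rw [PySem.List.pyGetD_eq_getElem _ _ (by omega) (by rw [List.length_set]; omega),
            List.getElem_set_self]
        rw [hprev, hcur, List.set_set]
      · rw [if_neg hc, if_neg hc]
        exact ih t ht

-- one outer step fills the next row.
lemma outer_step (br : List (Int × Int)) (n : Int) (hn : 1 ≤ n) (q : Nat) (hq : q + 1 < n.toNat) :
    (PySem.List.pyRange 0 (n - ((q : Int) + 1)) 1).foldl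
      (fun t j => if getBR br (((q : Int) + 1) + 1) ≠ some (j + 1) then
        PySem.List.pySetD t ((q : Int) + 1) (PySem.List.pySetD (PySem.List.pyGetD t ((q : Int) + 1) []) j
          (PySem.List.pyGetD (PySem.List.pyGetD t (((q : Int) + 1) - 1) []) j 0
           + PySem.List.pyGetD (PySem.List.pyGetD t (((q : Int) + 1) - 1) []) (j + 1) 0))
      else t) (matA br n q)
    = matA br n (q + 1) := by
  have hn' : (n.toNat : Int) = n := Int.toNat_of_nonneg (by omega)
  have hlen : ((q : Int) + 1) < ((matA br n q).length : Int) := by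
    rw [length_matA]; omega
  rw [inner_to_set br ((q : Int) + 1) (by omega) _ (matA br n q) hlen]
  have hprev : PySem.List.pyGetD (matA br n q) (((q : Int) + 1) - 1) [] = padRow br n q := by
    rw [show ((q : Int) + 1) - 1 = ((q : Nat) : Int) from by ring,
      PySem.List.pyGetD_natCast, getD_matA _ _ _ _ (by omega), if_pos (le_refl q)]
  have hr0 : PySem.List.pyGetD (matA br n q) ((q : Int) + 1) [] = List.replicate n.toNat 0 := by
    rw [show ((q : Int) + 1) = (((q + 1 : Nat)) : Int) from by push_cast; ring,
      PySem.List.pyGetD_natCast, getD_matA _ _ _ _ (by omega), if_neg (by omega)]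
  simp only [hprev, hr0]
  have hlen0 : (trueRow br n q).length = n.toNat - q := length_trueRow br n q (by omega)
  have hlen1 : (trueRow br n (q + 1)).length = n.toNat - (q + 1) := length_trueRow br n (q + 1) (by omega)
  have hrow : (PySem.List.pyRange 0 (n - ((q : Int) + 1)) 1).foldl
      (fun r j => if getBR br (((q : Int) + 1) + 1) ≠ some (j + 1) then
        PySem.List.pySetD r j
          (PySem.List.pyGetD (padRow br n q) j 0 + PySem.List.pyGetD (padRow br n q) (j + 1) 0)
      else r) (List.replicate n.toNat 0) = padRow br n (q + 1) := by
    apply eq_of_getD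
    · rw [length_foldl_pySetD (fun j => getBR br (((q : Int) + 1) + 1) ≠ some (j + 1)) (fun j => PySem.List.pyGetD (padRow br n q) j 0 + PySem.List.pyGetD (padRow br n q) (j + 1) 0) (PySem.List.pyRange 0 (n - ((q : Int) + 1)) 1) (List.replicate n.toNat (0 : Int))]
      simp only [List.length_replicate, padRow, List.length_append, List.length_replicate, hlen1]
      omega
    · intro qq hqq
      rw [length_foldl_pySetD (fun j => getBR br (((q : Int) + 1) + 1) ≠ some (j + 1)) (fun j => PySem.List.pyGetD (padRow br n q) j 0 + PySem.List.pyGetD (padRow br n q) (j + 1) 0) (PySem.List.pyRange 0 (n - ((q : Int) + 1)) 1) (List.replicate n.toNat (0 : Int)), List.length_replicate] at hqq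
      rw [getD_foldl_pySetD (fun j => getBR br (((q : Int) + 1) + 1) ≠ some (j + 1)) (fun j => PySem.List.pyGetD (padRow br n q) j 0 + PySem.List.pyGetD (padRow br n q) (j + 1) 0) (PySem.List.pyRange 0 (n - ((q : Int) + 1)) 1) (PySem.List.nodup_pyRange_one _ _)
        (fun j hj => ((PySem.List.mem_pyRange_one).mp hj).1) (List.replicate n.toNat (0 : Int)) qq
        (by rw [List.length_replicate]; omega)]
      simp only [PySem.List.mem_pyRange_one]
      by_cases hlo : qq < n.toNat - (q + 1)
      · have hmem : (0 : Int) ≤ (qq : Int) ∧ (qq : Int) < n - ((q : Int) + 1) := by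
          constructor <;> omega
        rw [getD_padRow_lo br n (q + 1) qq (by rw [hlen1]; omega)]
        rw [trueRow, getD_nextRow _ _ _ (by rw [hlen0]; omega)]
        have hg1 : PySem.List.pyGetD (padRow br n q) (qq : Int) 0
            = PySem.List.pyGetD (trueRow br n q) (qq : Int) 0 := by
          rw [padRow, pyGetD_append_left_zero _ _ _ (by omega) (by rw [hlen0]; omega)]
        have hg2 : PySem.List.pyGetD (padRow br n q) ((qq : Int) + 1) 0
            = PySem.List.pyGetD (trueRow br n q) ((qq : Int) + 1) 0 := by
          rw [padRow, pyGetD_append_left_zero _ _ _ (by omega) (by rw [hlen0]; omega)]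
        have hkey : ((q : Int) + 1) + 1 = (q : Int) + 2 := by ring
        rw [hkey]
        by_cases hb : getBR br ((q : Int) + 2) = some ((qq : Int) + 1)
        · rw [if_neg (fun hcontra => hcontra.2 hb), if_pos hb]
          exact getD_replicate_zero _ _
        · rw [if_pos ⟨hmem, hb⟩, if_neg hb, hg1, hg2]
      · rw [if_neg (by rintro ⟨⟨_, h2⟩, _⟩; omega)]
        rw [getD_padRow_hi br n (q + 1) qq (by rw [hlen1]; omega)]
        exact getD_replicate_zero _ _
  rw [hrow, show ((q : Int) + 1).toNat = q + 1 from by omega]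
  apply eq_of_getD'
  · rw [List.length_set, length_matA, length_matA]
  · intro idx h1
    rw [List.length_set, length_matA] at h1
    by_cases hidx : idx = q + 1
    · subst hidx
      rw [List.getD_eq_getElem _ _ (by rw [List.length_set, length_matA]; omega),
        List.getElem_set_self, getD_matA _ _ _ _ (by omega), if_pos (le_refl _)]
    · rw [List.getD_eq_getElem?_getD, List.getElem?_set_ne (by omega),
        ← List.getD_eq_getElem?_getD, getD_matA _ _ _ _ (by omega),
        getD_matA _ _ _ _ (by omega)]
      by_cases hle : idx ≤ q
      · rw [if_pos hle, if_pos (by omega)]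
      · rw [if_neg hle, if_neg (by omega)]

lemma A_outer (br : List (Int × Int)) (n : Int) (hn : 1 ≤ n) (d : Nat) (hd : d < n.toNat) :
    (((List.range d).map (fun i : Nat => (1 : Int) + (i : Int))).foldl
      (fun t i => (PySem.List.pyRange 0 (n - i) 1).foldl
        (fun t j => if getBR br (i + 1) ≠ some (j + 1) then
          PySem.List.pySetD t i (PySem.List.pySetD (PySem.List.pyGetD t i []) j
            (PySem.List.pyGetD (PySem.List.pyGetD t (i - 1) []) j 0
             + PySem.List.pyGetD (PySem.List.pyGetD t (i - 1) []) (j + 1) 0))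
        else t) t) (matA br n 0)) = matA br n d := by
  induction d with
  | zero => rfl
  | succ d ih =>
      rw [List.range_succ, List.map_append, List.foldl_append, ih (by omega)]
      simp only [List.map_cons, List.map_nil, List.foldl_cons, List.foldl_nil]
      have hkey : (1 : Int) + (d : Int) = (d : Int) + 1 := by ring
      rw [hkey]
      exact outer_step br n hn d (by omega)

lemma tab1_eq (n : Int) (br : List (Int × Int)) (h : 1 ≤ n) :
    ((PySem.List.pyRange 0 n 1).foldl (fun t i =>
      if getBR br 1 ≠ some (i + 1) then
        PySem.List.pySetD t 0 (PySem.List.pySetD (PySem.List.pyGetD t 0 []) i 1)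
      else t)
      ((PySem.List.pyRange 0 n 1).map (fun _ => (PySem.List.pyRange 0 n 1).map (fun _ => (0 : Int)))))
    = matA br n 0 := by
  have hconst : ∀ {α : Type} (x : α), (PySem.List.pyRange 0 n 1).map (fun _ => x)
      = List.replicate n.toNat x := by
    intro α x
    refine List.eq_replicate_iff.mpr ⟨?_, ?_⟩
    · simp [PySem.List.length_pyRange_one]
    · intro b hb
      rcases List.mem_map.mp hb with ⟨a, -, h⟩
      exact h.symm
  rw [hconst ((PySem.List.pyRange 0 n 1).map (fun _ => (0 : Int))), hconst (0 : Int)]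
  obtain ⟨m', hm'⟩ : ∃ m', n.toNat = m' + 1 := ⟨n.toNat - 1, by omega⟩
  rw [hm', List.replicate_succ,
    foldl_set_zero (fun i => getBR br 1 ≠ some (i + 1)) (fun i r => PySem.List.pySetD r i 1)
      (PySem.List.pyRange 0 n 1) (List.replicate (m' + 1) (0 : Int))
      (List.replicate m' (List.replicate (m' + 1) (0 : Int)))]
  apply eq_of_getD'
  · simp only [List.length_cons, List.length_replicate, length_matA]
    omega
  · intro idx h1
    simp only [List.length_cons, List.length_replicate] at h1
    match idx with
    | 0 =>
        rw [List.getD_cons_zero, getD_matA _ _ _ _ (by omega), if_pos (le_refl 0)]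
        have hpad : padRow br n 0 = trueRow br n 0 := by
          simp [padRow]
        rw [hpad]
        apply eq_of_getD
        · rw [length_foldl_pySetD (fun i => getBR br 1 ≠ some (i + 1)) (fun _ => (1 : Int)) (PySem.List.pyRange 0 n 1) (List.replicate (m' + 1) (0 : Int)), List.length_replicate,
            length_trueRow br n 0 (by omega)]
          omega
        · intro qq hqq
          rw [length_foldl_pySetD (fun i => getBR br 1 ≠ some (i + 1)) (fun _ => (1 : Int)) (PySem.List.pyRange 0 n 1) (List.replicate (m' + 1) (0 : Int)), List.length_replicate] at hqq
          rw [getD_foldl_pySetD (fun i => getBR br 1 ≠ some (i + 1)) (fun _ => (1 : Int)) (PySem.List.pyRange 0 n 1) (PySem.List.nodup_pyRange_one _ _)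
            (fun j hj => ((PySem.List.mem_pyRange_one).mp hj).1) (List.replicate (m' + 1) (0 : Int)) qq
            (by rw [List.length_replicate]; omega),
            getD_trueRow_zero br n qq (by omega)]
          simp only [PySem.List.mem_pyRange_one]
          by_cases hb : getBR br 1 = some ((qq : Int) + 1)
          · rw [if_neg (fun hcontra => hcontra.2 hb), if_pos hb]
            exact getD_replicate_zero _ _
          · rw [if_pos ⟨⟨by omega, by omega⟩, hb⟩, if_neg hb]
    | idx + 1 =>
        rw [List.getD_cons_succ, getD_matA _ _ _ _ (by omega), if_neg (by omega),
          List.getD_eq_getElem _ _ (by simp only [List.length_replicate]; omega),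
          List.getElem_replicate, hm']

lemma A_value (n : Int) (br : List (Int × Int)) (h : 1 ≤ n) :
    clibingPyramid n br = PySem.List.pyGetD (trueRow br n (n.toNat - 1)) 0 0 := by
  unfold clibingPyramid
  show PySem.List.pyGetD (PySem.List.pyGetD
      ((PySem.List.pyRange 1 n 1).foldl (fun t i =>
        (PySem.List.pyRange 0 (n - i) 1).foldl (fun t j =>
          if getBR br (i + 1) ≠ some (j + 1) then
            PySem.List.pySetD t i (PySem.List.pySetD (PySem.List.pyGetD t i []) j
              (PySem.List.pyGetD (PySem.List.pyGetD t (i - 1) []) j 0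
               + PySem.List.pyGetD (PySem.List.pyGetD t (i - 1) []) (j + 1) 0))
          else t) t)
        ((PySem.List.pyRange 0 n 1).foldl (fun t i =>
          if getBR br 1 ≠ some (i + 1) then
            PySem.List.pySetD t 0 (PySem.List.pySetD (PySem.List.pyGetD t 0 []) i 1)
          else t)
          ((PySem.List.pyRange 0 n 1).map
            (fun _ => (PySem.List.pyRange 0 n 1).map (fun _ => (0 : Int))))))
      (n - 1) []) 0 0
    = PySem.List.pyGetD (trueRow br n (n.toNat - 1)) 0 0
  rw [tab1_eq n br h]
  have hr1 := PySem.List.pyRange_one 1 n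
  rw [hr1, A_outer br n h ((n - 1).toNat) (by omega)]
  rw [show (n - 1 : Int) = (((n - 1).toNat : Nat) : Int) from (Int.toNat_of_nonneg (by omega)).symm,
    PySem.List.pyGetD_natCast, getD_matA _ _ _ _ (by omega), if_pos (by omega)]
  simp only [padRow]
  rw [pyGetD_append_left_zero _ _ _ (le_refl 0)
    (by rw [length_trueRow br n _ (by omega)]; omega)]
  have hk : (n - 1).toNat = n.toNat - 1 := by omega
  rw [hk]

-- ===== B-side lemmas =====

-- countF i j: value of pyramid cell (row i, column j), the recurrence both programs count.
def countF (br : List (Int × Int)) : Nat → Nat → Int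
  | 0, j => if getBR br 1 = some ((j : Int) + 1) then 0 else 1
  | i + 1, j => if getBR br ((i : Int) + 2) = some ((j : Int) + 1) then 0
      else countF br i j + countF br i (j + 1)

lemma trueRow_countF (br : List (Int × Int)) (n : Int) :
    ∀ i j : Nat, i < n.toNat → j < n.toNat - i →
      (trueRow br n i).getD j 0 = countF br i j := by
  intro i
  induction i with
  | zero =>
      intro j _ hj
      rw [getD_trueRow_zero br n j (by omega)]
      rfl
  | succ i ih =>
      intro j hi hj
      have hlen : (trueRow br n i).length = n.toNat - i := length_trueRow br n i (by omega)
      rw [trueRow, getD_nextRow _ _ _ (by rw [hlen]; omega)]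
      rw [show ((j : Int) + 1) = (((j + 1 : Nat)) : Int) from by push_cast; ring]
      rw [PySem.List.pyGetD_natCast, PySem.List.pyGetD_natCast]
      rw [ih j (by omega) (by omega), ih (j + 1) (by omega) (by omega)]
      rfl

-- ---- comb lemmas ----
lemma comb_of_neg_right (m r : Int) (h : r < 0) : comb m r = 0 := by
  rw [comb, if_pos (Or.inl h)]

lemma comb_of_lt (m r : Int) (h : m < r) : comb m r = 0 := by
  rw [comb, if_pos (Or.inr h)]

lemma comb_of_neg_left (m r : Int) (h : m < 0) : comb m r = 0 := by
  by_cases hr : r < 0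
  · exact comb_of_neg_right m r hr
  · exact comb_of_lt m r (by omega)

lemma comb_loop (m : Int) : ∀ k : Nat, (k : Int) ≤ m →
    ((List.range k).map (fun i : Nat => (i : Int))).foldl
      (fun res t => PySem.Int.floordiv (res * (m - t)) (t + 1)) 1
    = (m.toNat.choose k : Int) := by
  intro k
  induction k with
  | zero => intro _; simp
  | succ k ih =>
      intro hk
      rw [List.range_succ, List.map_append, List.foldl_append, ih (by omega)]
      simp only [List.map_cons, List.map_nil, List.foldl_cons, List.foldl_nil]
      have h1 : (m.toNat.choose k : Int) * (m - (k : Int))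
          = ((m.toNat.choose k * (m.toNat - k) : Nat) : Int) := by
        push_cast
        have : ((m.toNat - k : Nat) : Int) = m - (k : Int) := by omega
        rw [this]
      rw [h1, show ((k : Int) + 1) = (((k + 1 : Nat)) : Int) from by push_cast; ring,
        PySem.Int.floordiv_natCast]
      rw [← Nat.choose_succ_right_eq m.toNat k]
      rw [Nat.mul_div_cancel _ (by omega)]

lemma comb_eq_choose (m r : Int) (h0 : 0 ≤ r) (h1 : r ≤ m) :
    comb m r = (m.toNat.choose r.toNat : Int) := by
  rw [comb, if_neg (by omega)]
  have hr : PySem.List.pyRange 0 r 1 = (List.range r.toNat).map (fun i : Nat => (i : Int)) := by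
    rw [PySem.List.pyRange_one]
    simp
  rw [hr, comb_loop m r.toNat (by omega)]

lemma comb_zero_zero : comb 0 0 = 1 := by decide

lemma comb_nonneg_zero (m : Int) (h : 0 ≤ m) : comb m 0 = 1 := by
  rw [comb_eq_choose m 0 le_rfl h]
  simp

lemma comb_zero_of_ne (r : Int) (h : r ≠ 0) : comb 0 r = 0 := by
  by_cases hr : r < 0
  · exact comb_of_neg_right 0 r hr
  · exact comb_of_lt 0 r (by omega)

lemma comb_pascal (m r : Int) (hm : 0 ≤ m) :
    comb (m + 1) r = comb m r + comb m (r - 1) := by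
  by_cases hr0 : r < 0
  · rw [comb_of_neg_right _ _ hr0, comb_of_neg_right _ _ hr0,
      comb_of_neg_right _ _ (by omega)]
    ring
  by_cases hre : r = 0
  · subst hre
    rw [comb_nonneg_zero _ (by omega), comb_nonneg_zero _ hm,
      comb_of_neg_right _ _ (by omega)]
    ring
  by_cases hrm : r ≤ m
  · rw [comb_eq_choose _ _ (by omega) (by omega), comb_eq_choose _ _ (by omega) hrm,
      comb_eq_choose _ _ (by omega) (by omega)]
    have e1 : (m + 1).toNat = m.toNat + 1 := by omega
    have e2 : r.toNat = (r - 1).toNat + 1 := by omega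
    rw [e1, e2, Nat.choose_succ_succ]
    push_cast
    ring
  by_cases hr1 : r = m + 1
  · subst hr1
    rw [comb_eq_choose _ _ (by omega) le_rfl, comb_of_lt _ _ (by omega),
      comb_eq_choose _ _ (by omega) (by omega)]
    have e1 : (m + 1).toNat = (m + 1).toNat := rfl
    rw [Nat.choose_self, show (m + 1 - 1 : Int).toNat = m.toNat from by omega, Nat.choose_self]
    ring
  · rw [comb_of_lt _ _ (by omega), comb_of_lt _ _ (by omega), comb_of_lt _ _ (by omega)]
    ring

-- ---- combSum lemmas ----
lemma combSum_append (P Q : List ((Int × Int) × Int)) (l p : Int) :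
    combSum (P ++ Q) l p = combSum P l p + combSum Q l p := by
  simp [combSum]

lemma combSum_cons (cf : (Int × Int) × Int) (P : List ((Int × Int) × Int)) (l p : Int) :
    combSum (cf :: P) l p = cf.2 * comb (l - cf.1.1) (cf.1.2 - p) + combSum P l p := by
  simp [combSum]

lemma combSum_eq_zero (P : List ((Int × Int) × Int)) (l p : Int)
    (h : ∀ cf ∈ P, l < cf.1.1) : combSum P l p = 0 := by
  induction P with
  | nil => rfl
  | cons cf P ih =>
      rw [combSum_cons, comb_of_neg_left _ _ (by have := h cf (List.mem_cons_self); omega),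
        ih (fun x hx => h x (List.mem_cons_of_mem _ hx))]
      ring

lemma combSum_pascal (P : List ((Int × Int) × Int)) (l p : Int)
    (h : ∀ cf ∈ P, cf.1.1 = l + 1 → cf.1.2 ≠ p) :
    combSum P (l + 1) p = combSum P l p + combSum P l (p + 1) := by
  induction P with
  | nil => rfl
  | cons cf P ih =>
      rw [combSum_cons, combSum_cons, combSum_cons,
        ih (fun x hx => h x (List.mem_cons_of_mem _ hx))]
      have hterm : comb (l + 1 - cf.1.1) (cf.1.2 - p)
          = comb (l - cf.1.1) (cf.1.2 - p) + comb (l - cf.1.1) (cf.1.2 - (p + 1)) := by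
        by_cases hle : cf.1.1 ≤ l
        · rw [show l + 1 - cf.1.1 = (l - cf.1.1) + 1 from by ring,
            comb_pascal _ _ (by omega),
            show cf.1.2 - p - 1 = cf.1.2 - (p + 1) from by ring]
        by_cases heq : cf.1.1 = l + 1
        · have hne := h cf List.mem_cons_self heq
          rw [show l + 1 - cf.1.1 = 0 from by omega,
            comb_zero_of_ne _ (by omega),
            comb_of_neg_left _ _ (by omega), comb_of_neg_left _ _ (by omega)]
          ring
        · rw [comb_of_neg_left _ _ (by omega), comb_of_neg_left _ _ (by omega),
            comb_of_neg_left _ _ (by omega)]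
          ring
      rw [hterm]
      ring

lemma combSum_level_one (P : List ((Int × Int) × Int)) (p : Int)
    (h : ∀ cf ∈ P, 1 ≤ cf.1.1 ∧ (cf.1.1 = 1 → cf.1.2 ≠ p)) :
    combSum P 1 p = 0 := by
  induction P with
  | nil => rfl
  | cons cf P ih =>
      obtain ⟨h1, h2⟩ := h cf List.mem_cons_self
      rw [combSum_cons, ih (fun x hx => h x (List.mem_cons_of_mem _ hx))]
      by_cases heq : cf.1.1 = 1
      · rw [show (1 : Int) - cf.1.1 = 0 from by omega, comb_zero_of_ne _ (by have := h2 heq; omega)]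
        ring
      · rw [comb_of_neg_left _ _ (by omega)]
        ring

-- ---- cells / first structure ----
lemma cells_mem (n : Int) (br : List (Int × Int)) (hnd : (br.map Prod.fst).Nodup)
    (c : Int × Int) (hc : c ∈ cellsOf n br) :
    getBR br c.1 = some c.2 ∧ 1 ≤ c.1 ∧ c.1 ≤ n ∧ 1 ≤ c.2 ∧ c.2 ≤ n - c.1 + 1 := by
  obtain ⟨c1, c2⟩ := c
  rw [cellsOf, PySem.List.mem_sorted] at hc
  have hmem := List.mem_of_mem_filter hc
  have hpred := List.of_mem_filter hc
  simp only [decide_eq_true_eq] at hpred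
  refine ⟨?_, hpred.1, hpred.2.1, hpred.2.2.1, hpred.2.2.2⟩
  have hknd : (PySem.Dict.mk br).keys.Nodup := by
    simpa [PySem.Dict.keys] using hnd
  exact PySem.Dict.get?_of_mem_items _ hmem hknd

lemma cells_complete (n : Int) (br : List (Int × Int)) (l p : Int)
    (hb : getBR br l = some p) (h1 : 1 ≤ l) (h2 : l ≤ n) (h3 : 1 ≤ p) (h4 : p ≤ n - l + 1) :
    (l, p) ∈ cellsOf n br := by
  rw [cellsOf, PySem.List.mem_sorted]
  apply List.mem_filter.mpr
  have hb' : (PySem.Dict.mk br).get? l = some p := hb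
  refine ⟨PySem.Dict.mem_items_of_get?_eq_some _ hb', by simp [h1, h2, h3, h4]⟩

lemma cells_strict (n : Int) (br : List (Int × Int)) (hnd : (br.map Prod.fst).Nodup) :
    (cellsOf n br).Pairwise (fun a b => a.1 < b.1) := by
  have hperm : (cellsOf n br).Perm
      (((PySem.Dict.mk br).items).filter
        (fun lp => decide (1 ≤ lp.1 ∧ lp.1 ≤ n ∧ 1 ≤ lp.2 ∧ lp.2 ≤ n - lp.1 + 1))) :=
    PySem.List.sorted_perm _ _ _
  have hfnd : ((((PySem.Dict.mk br).items).filter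
      (fun lp => decide (1 ≤ lp.1 ∧ lp.1 ≤ n ∧ 1 ≤ lp.2 ∧ lp.2 ≤ n - lp.1 + 1))).map Prod.fst).Nodup := by
    apply List.Nodup.sublist (List.Sublist.map Prod.fst (List.filter_sublist))
    exact hnd
  have hcnd : ((cellsOf n br).map Prod.fst).Nodup :=
    (hperm.map Prod.fst).nodup_iff.mpr hfnd
  have hle : (cellsOf n br).Pairwise (fun a b => a.1 ≤ b.1) := by
    have := PySem.List.sorted_pairwise
      (xs := (((PySem.Dict.mk br).items).filter
        (fun lp => decide (1 ≤ lp.1 ∧ lp.1 ≤ n ∧ 1 ≤ lp.2 ∧ lp.2 ≤ n - lp.1 + 1))))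
      (key := fun c : Int × Int => c.1)
    exact this
  have hne : (cellsOf n br).Pairwise (fun a b => a.1 ≠ b.1) :=
    List.pairwise_map.mp hcnd
  exact (hle.and hne).imp (fun h => by omega)

lemma zip_truncate {α β : Type} : ∀ (xs : List α) (ys : List β),
    xs.zip ys = (xs.take ys.length).zip ys := by
  intro xs
  induction xs with
  | nil => intro ys; simp
  | cons x xs ih =>
      intro ys
      cases ys with
      | nil => simp
      | cons y ys => simp [List.zip_cons_cons, ih ys]

lemma length_fold_stepF (full : List (Int × Int)) :
    ∀ (cs : List (Int × Int)) (acc : List Int),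
      (cs.foldl (stepF full) acc).length = acc.length + cs.length := by
  intro cs
  induction cs with
  | nil => intro acc; simp
  | cons c cs ih =>
      intro acc
      rw [List.foldl_cons, ih]
      simp [stepF]
      omega

lemma fold_stepF_append (full : List (Int × Int)) :
    ∀ (cs : List (Int × Int)) (acc : List Int),
      ∃ t, cs.foldl (stepF full) acc = acc ++ t ∧ t.length = cs.length := by
  intro cs
  induction cs with
  | nil => intro acc; exact ⟨[], by simp⟩
  | cons c cs ih =>
      intro acc
      rw [List.foldl_cons]
      obtain ⟨t, ht, hl⟩ := ih (stepF full acc c)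
      refine ⟨[2 ^ (c.1 - 1).toNat - combSum (full.zip acc) c.1 c.2] ++ t, ?_, by simp [hl]⟩
      rw [ht, stepF, List.append_assoc]

-- the first-hit sum over a list split at a cell (l, p), all later cells above level l.
lemma combSum_split_generic (cs1 cs2 : List (Int × Int)) (l p : Int)
    (hhi : ∀ x ∈ cs2, l < x.1) :
    combSum ((cs1 ++ (l, p) :: cs2).zip
        ((cs1 ++ (l, p) :: cs2).foldl (stepF (cs1 ++ (l, p) :: cs2)) [])) l p
      = 2 ^ (l - 1).toNat := by
  set full := cs1 ++ (l, p) :: cs2 with hfull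
  have hlen1 : (cs1.foldl (stepF full) []).length = cs1.length := by
    rw [length_fold_stepF]
    simp
  have htake : full.take cs1.length = cs1 := by
    rw [hfull, List.take_left]
  have hstep : stepF full (cs1.foldl (stepF full) []) (l, p)
      = cs1.foldl (stepF full) []
        ++ [2 ^ (l - 1).toNat - combSum (cs1.zip (cs1.foldl (stepF full) [])) l p] := by
    rw [stepF, zip_truncate full (cs1.foldl (stepF full) []), hlen1, htake]
  obtain ⟨t, ht, htl⟩ := fold_stepF_append full cs2 (stepF full (cs1.foldl (stepF full) []) (l, p))
  have e0 : full.foldl (stepF full) []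
      = cs1.foldl (stepF full) []
        ++ ((2 ^ (l - 1).toNat - combSum (cs1.zip (cs1.foldl (stepF full) [])) l p) :: t) := by
    conv_lhs => rw [hfull]
    rw [List.foldl_append, List.foldl_cons, ht, hstep, List.append_assoc]
    rfl
  rw [e0]
  conv_lhs => rw [hfull]
  rw [List.zip_append hlen1.symm, combSum_append, List.zip_cons_cons, combSum_cons]
  rw [combSum_eq_zero (cs2.zip t) l p (by
    intro cf hcf
    exact hhi cf.1 (List.of_mem_zip hcf).1)]
  simp only [show l - l = 0 from by ring, show p - p = 0 from by ring]
  rw [comb_zero_zero]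
  ring

-- the decisive fact: at a broken cell (l, p) the full first-hit sum is exactly 2^(l-1).
lemma combSum_broken (n : Int) (br : List (Int × Int)) (hnd : (br.map Prod.fst).Nodup)
    (l p : Int) (hb : getBR br l = some p)
    (h1 : 1 ≤ l) (h2 : l ≤ n) (h3 : 1 ≤ p) (h4 : p ≤ n - l + 1) :
    combSum ((cellsOf n br).zip ((cellsOf n br).foldl (stepF (cellsOf n br)) [])) l p
      = 2 ^ (l - 1).toNat := by
  obtain ⟨cs1, cs2, hsplit⟩ := List.append_of_mem (cells_complete n br l p hb h1 h2 h3 h4)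
  have hpw := cells_strict n br hnd
  rw [hsplit] at hpw
  have hhi : ∀ x ∈ cs2, l < x.1 := by
    have := (List.pairwise_append.mp hpw).2.1
    rw [List.pairwise_cons] at this
    exact fun x hx => this.1 x hx
  rw [hsplit]
  exact combSum_split_generic cs1 cs2 l p hhi

-- the master identity: cell value = 2^row − first-hit decomposition sum.
lemma key_identity (n : Int) (br : List (Int × Int)) (hnd : (br.map Prod.fst).Nodup) :
    ∀ k j : Nat, (j : Int) + (k : Int) < n →
      countF br k j
        = 2 ^ k - combSum ((cellsOf n br).zip ((cellsOf n br).foldl (stepF (cellsOf n br)) []))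
            ((k : Int) + 1) ((j : Int) + 1) := by
  intro k
  induction k with
  | zero =>
      intro j hj
      rw [countF]
      by_cases hb : getBR br 1 = some ((j : Int) + 1)
      · rw [if_pos hb]
        rw [show ((0 : Nat) : Int) + 1 = 1 from by norm_num,
          combSum_broken n br hnd 1 ((j : Int) + 1) hb (by omega) (by omega) (by omega) (by omega)]
        norm_num
      · rw [if_neg hb]
        rw [show ((0 : Nat) : Int) + 1 = 1 from by norm_num,
          combSum_level_one _ _ (by
            intro cf hcf
            obtain ⟨hg, hl1, _, _, _⟩ := cells_mem n br hnd cf.1 (List.of_mem_zip hcf).1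
            refine ⟨hl1, fun he hp => ?_⟩
            rw [he] at hg
            rw [hp] at hg
            exact hb hg)]
        norm_num
  | succ k ih =>
      intro j hj
      rw [countF]
      by_cases hb : getBR br ((k : Int) + 2) = some ((j : Int) + 1)
      · rw [if_pos hb]
        rw [show ((k + 1 : Nat) : Int) + 1 = (k : Int) + 2 from by push_cast; ring,
          combSum_broken n br hnd ((k : Int) + 2) ((j : Int) + 1) hb (by omega) (by omega)
            (by omega) (by omega),
          show ((k : Int) + 2 - 1).toNat = k + 1 from by omega]
        ring
      · rw [if_neg hb]
        rw [ih j (by omega), ih (j + 1) (by push_cast; omega)]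
        rw [show ((j + 1 : Nat) : Int) + 1 = ((j : Int) + 1) + 1 from by push_cast; ring,
          show ((k + 1 : Nat) : Int) + 1 = ((k : Int) + 1) + 1 from by push_cast; ring]
        rw [combSum_pascal _ ((k : Int) + 1) ((j : Int) + 1) (by
          intro cf hcf he hp
          obtain ⟨hg, _, _, _, _⟩ := cells_mem n br hnd cf.1 (List.of_mem_zip hcf).1
          rw [he] at hg
          rw [hp] at hg
          exact hb (by rw [show (k : Int) + 2 = (k : Int) + 1 + 1 from by ring]; exact hg))]
        ring

lemma B_value (n : Int) (br : List (Int × Int)) (h : 1 ≤ n) (hnd : (br.map Prod.fst).Nodup) :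
    clibingPyramid_alt n br = countF br (n.toNat - 1) 0 := by
  unfold clibingPyramid_alt
  have hk := key_identity n br hnd (n.toNat - 1) 0 (by omega)
  rw [hk]
  rw [show (((n.toNat - 1 : Nat)) : Int) + 1 = n from by omega,
    show ((0 : Nat) : Int) + 1 = 1 from by norm_num,
    show (n - 1).toNat = n.toNat - 1 from by omega]

-- ===== VERDICT (by name: the statement is the Claim_ definition above) =====
theorem clibingPyramid_spec : Claim_equal_clibingPyramid := by
  intro n br _ hpre
  obtain ⟨hn, hnd⟩ := hpre
  unfold Spec_clibingPyramid
  rw [A_value n br hn, B_value n br hn hnd, PySem.List.pyGetD_ofNat',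
    trueRow_countF br n (n.toNat - 1) 0 (by omega) (by omega)]
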